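-- pv_equiv track=rewrite | github.com/minarizk5/Robik-Solver | Robik Solver.py | validate_cube_state
-- ===== SOURCE A (Python) =====
-- def validate_cube_state(cube_string):
--     """
--     Validate if the cube state string is valid (54 characters, proper colors)
--     """
--     if len(cube_string) != 54:
--         return False
--
--     # Valid colors in Rubik's cube
--     valid_colors = {'U', 'R', 'F', 'D', 'L', 'B'}
--
--     # Check if all characters are valid colors
--     for char in cube_string:
--         if char not in valid_colors:
--             return False
--
--     # Check if each face has exactly 9 pieces
--     color_count = {}
--     for char in cube_string:
--         color_count[char] = color_count.get(char, 0) + 1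
--
--     for count in color_count.values():
--         if count != 9:
--             return False
--
--     return True
-- ===== SOURCE B (Python) =====
-- def validate_cube_state(cube_string):
--     """
--     Validate if the cube state string is valid (54 characters, proper colors)
--     """
--     reference = 'U' * 9 + 'R' * 9 + 'F' * 9 + 'D' * 9 + 'L' * 9 + 'B' * 9
--     return sorted(cube_string) == sorted(reference)
-- ===== Notes on version B (the rewrite author's own statement) =====
-- stated objective: simpler
-- what changed: B replaces A's length check, validity scan and dict-counting loops with a single sort-and-compare against the reference multiset of nine stickers of each of the six colors.
import Mathlib
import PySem

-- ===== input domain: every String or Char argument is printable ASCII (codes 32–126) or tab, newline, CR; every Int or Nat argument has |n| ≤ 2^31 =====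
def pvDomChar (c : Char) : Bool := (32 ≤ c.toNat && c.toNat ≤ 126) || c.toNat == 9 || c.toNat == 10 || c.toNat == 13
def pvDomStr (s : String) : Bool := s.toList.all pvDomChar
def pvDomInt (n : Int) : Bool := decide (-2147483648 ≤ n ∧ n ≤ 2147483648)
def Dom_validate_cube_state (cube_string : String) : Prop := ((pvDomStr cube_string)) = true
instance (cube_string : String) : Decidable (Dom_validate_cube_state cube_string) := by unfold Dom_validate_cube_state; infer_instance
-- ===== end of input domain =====

-- B validates the cube state by one sort-and-compare against the reference multiset
-- (nine stickers of each of the six colors) instead of A's scan + dict-counting loops (objective: simpler).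


-- ===== PORT A =====
def validate_cube_state (cube_string : String) : Bool :=
  -- if len(cube_string) != 54: return False
  if cube_string.toList.length ≠ 54 then false
  else
    -- valid_colors = {'U', 'R', 'F', 'D', 'L', 'B'}
    let valid_colors : PySem.Set Char := PySem.Set.ofList ['U', 'R', 'F', 'D', 'L', 'B']
    -- for char in cube_string: if char not in valid_colors: return False
    if cube_string.toList.any (fun c => !(PySem.Set.contains valid_colors c)) then false
    else
      -- color_count[char] = color_count.get(char, 0) + 1
      let color_count : PySem.Dict Char Int :=
        cube_string.toList.foldl (fun d c => d.insert c (d.getD c 0 + 1)) PySem.Dict.empty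
      -- for count in color_count.values(): if count != 9: return False
      if color_count.values.any (fun n => n ≠ 9) then false
      else true

-- ===== PORT B =====
def validate_cube_state_alt (cube_string : String) : Bool :=
  -- reference = 'U' * 9 + 'R' * 9 + 'F' * 9 + 'D' * 9 + 'L' * 9 + 'B' * 9
  let reference : List Char :=
    PySem.List.pyRepeat ['U'] 9 ++ PySem.List.pyRepeat ['R'] 9 ++ PySem.List.pyRepeat ['F'] 9 ++
    PySem.List.pyRepeat ['D'] 9 ++ PySem.List.pyRepeat ['L'] 9 ++ PySem.List.pyRepeat ['B'] 9
  -- return sorted(cube_string) == sorted(reference)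
  decide (PySem.List.sorted cube_string.toList (fun x => x) = PySem.List.sorted reference (fun x => x))

-- ===== PRECONDITION & SPEC =====
def Spec_validate_cube_state (cube_string : String) (out : Bool) : Prop := out = validate_cube_state_alt cube_string
instance (cube_string : String) (out : Bool) : Decidable (Spec_validate_cube_state cube_string out) := by unfold Spec_validate_cube_state; infer_instance

-- ===== CLAIM (what is proved, stated in full; the proofs are below) =====
def Claim_equal_validate_cube_state : Prop := ∀ (cube_string : String), Dom_validate_cube_state cube_string → Spec_validate_cube_state cube_string (validate_cube_state cube_string)

-- ===== LEMMAS AND PROOFS =====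

def pvColors : List Char := ['U', 'R', 'F', 'D', 'L', 'B']

def pvRef : List Char :=
  PySem.List.pyRepeat ['U'] 9 ++ PySem.List.pyRepeat ['R'] 9 ++ PySem.List.pyRepeat ['F'] 9 ++
  PySem.List.pyRepeat ['D'] 9 ++ PySem.List.pyRepeat ['L'] 9 ++ PySem.List.pyRepeat ['B'] 9

lemma count_pvRef (a : Char) : pvRef.count a = if a ∈ pvColors then 9 else 0 := by
  simp only [pvRef, pvColors, PySem.List.pyRepeat_singleton, List.count_append,
    List.count_replicate, List.mem_cons, List.not_mem_nil, or_false]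
  simp only [beq_iff_eq]
  by_cases hm : a = 'U' ∨ a = 'R' ∨ a = 'F' ∨ a = 'D' ∨ a = 'L' ∨ a = 'B'
  · rw [if_pos hm]
    rcases hm with rfl | rfl | rfl | rfl | rfl | rfl <;> decide
  · rw [if_neg hm]
    push Not at hm
    obtain ⟨h1, h2, h3, h4, h5, h6⟩ := hm
    simp [Ne.symm h1, Ne.symm h2, Ne.symm h3, Ne.symm h4, Ne.symm h5, Ne.symm h6]

lemma alt_true_iff (s : String) :
    validate_cube_state_alt s = true ↔ s.toList.Perm pvRef := by
  simp [validate_cube_state_alt, pvRef, PySem.List.sorted_id_eq_sorted_id_iff_perm]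

lemma a_true_iff (s : String) :
    validate_cube_state s = true ↔
      s.toList.length = 54 ∧ (∀ c ∈ s.toList, c ∈ pvColors) ∧
      ∀ k ∈ s.toList, s.toList.count k = 9 := by
  simp only [validate_cube_state, PySem.Dict.foldl_insert_getD_add_one_eq_counter,
    PySem.Dict.values_eq_map_keys (PySem.Dict.counter s.toList) (PySem.Dict.nodup_keys_counter s.toList) 0,
    PySem.Dict.keys_counter, List.any_map, PySem.Dict.getD_counter, List.any_eq_true,
    PySem.Set.contains, PySem.Set.mem_ofList, pvColors, Function.comp_apply,
    decide_eq_true_eq, Bool.not_eq_true']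
  split_ifs with h1 h2 h3
  · simp only [false_iff]
    rintro ⟨h, -, -⟩; exact h1 h
  · simp only [false_iff]
    rintro ⟨-, hv, -⟩
    obtain ⟨x, hx, hc⟩ := h2
    have := hv x hx
    simp_all
  · simp only [false_iff]
    rintro ⟨-, -, hk⟩
    obtain ⟨x, hx, hc⟩ := h3
    have := hk x hx
    simp_all
  · simp only [true_iff]
    refine ⟨by omega, ?_, ?_⟩
    · intro c hc
      by_contra hcm
      exact h2 ⟨c, hc, by simp_all⟩
    · intro k hk
      by_contra hkm
      exact h3 ⟨k, hk, by exact_mod_cast hkm⟩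
lemma all_colors_mem (l : List Char) (h1 : l.length = 54)
    (h2 : ∀ c ∈ l, c ∈ pvColors) (h3 : ∀ k ∈ l, l.count k = 9) :
    ∀ a ∈ pvColors, a ∈ l := by
  have hsum : (l.dedup.map l.count).sum = l.length := List.sum_map_count_dedup_eq_length l
  have hconst : l.dedup.map l.count = List.replicate l.dedup.length 9 := by
    rw [List.eq_replicate_iff]
    constructor
    · simp
    · intro b hb
      rcases List.mem_map.mp hb with ⟨k, hk, rfl⟩
      exact h3 k (List.mem_dedup.mp hk)
  have hlen : l.dedup.length = 6 := by
    rw [hconst] at hsum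
    simp [List.sum_replicate, h1] at hsum
    omega
  have hsub : l.dedup ⊆ pvColors := fun x hx => h2 x (List.mem_dedup.mp hx)
  have hsp : List.Subperm l.dedup pvColors := (List.nodup_dedup l).subperm hsub
  have hperm : l.dedup.Perm pvColors := hsp.perm_of_length_le (by simp [pvColors, hlen])
  intro a ha
  exact List.mem_dedup.mp (hperm.symm.mem_iff.mp ha)

lemma main_iff (s : String) :
    validate_cube_state s = true ↔ validate_cube_state_alt s = true := by
  rw [a_true_iff, alt_true_iff]
  constructor
  · rintro ⟨h1, h2, h3⟩
    rw [List.perm_iff_count]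
    intro a
    rw [count_pvRef]
    by_cases ha : a ∈ pvColors
    · rw [if_pos ha]
      exact h3 a (all_colors_mem s.toList h1 h2 h3 a ha)
    · rw [if_neg ha]
      exact List.count_eq_zero.mpr (fun hmem => ha (h2 a hmem))
  · intro hp
    have hlen : s.toList.length = 54 := by
      rw [hp.length_eq]; decide
    have hcnt : ∀ a, s.toList.count a = pvRef.count a := List.perm_iff_count.mp hp
    refine ⟨hlen, ?_, ?_⟩
    · intro c hc
      have : pvRef.count c ≠ 0 := by
        rw [← hcnt]; simp [List.count_eq_zero]; exact hc
      rw [count_pvRef] at this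
      by_contra hcm
      simp [hcm] at this
    · intro k hk
      have hkcol : k ∈ pvColors := by
        have : pvRef.count k ≠ 0 := by
          rw [← hcnt]; simp [List.count_eq_zero]; exact hk
        rw [count_pvRef] at this
        by_contra hcm
        simp [hcm] at this
      rw [hcnt, count_pvRef, if_pos hkcol]

-- ===== VERDICT (by name: the statement is the Claim_ definition above) =====
theorem validate_cube_state_spec : Claim_equal_validate_cube_state := by
  intro s _
  show validate_cube_state s = validate_cube_state_alt s
  have := main_iff s
  cases h1 : validate_cube_state s <;> cases h2 : validate_cube_state_alt s <;> simp_all
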